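-- pv_equiv track=rewrite | github.com/RicardoPede/tareas-y-trabajos-TLP-3 | python class 4/4.py | palindrome_reorder
-- ===== SOURCE A (Python) =====
-- def palindrome_reorder(input):
--     diccionary = {}
--     for chararter in input:                     # se crea un diccionario con los caracteres del input y su frecuencia
--         if chararter in diccionary:             # si el carácter ya está en el diccionario...
--             diccionary[chararter] += 1          # se incrementa su frecuencia
--         else:                                   # si el carácter no está en el diccionario...
--             diccionary[chararter] = 1           # se agrega al diccionario con una frecuencia de 1
--
--     first = []                                  # se crea una lista vacía
--     middle = ""                                 # se crea una cadena de texto vacía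
--     for key in diccionary:                      # se utiliza un ciclo for para recorrer los elementos del diccionario
--         if diccionary[key] % 2 == 0:            # si el valor de la key es par...
--             first.extend([key] * (diccionary[key] // 2))  # se agrega a la lista first
--         else:                                   # si el valor de la key es impar...
--             if middle:                          # si ya hay un carácter en el medio...
--                 return "NO SOLUTION"            # se retorna "NO SOLUTION"
--             middle = key                        # se asigna el carácter impar al medio
--             first.extend([key] * (diccionary[key] // 2))  # se agrega la mitad de los caracteres impares a la lista first
--
--     answer = first + list(middle) + first[::-1] # se crea la lista answer con la lista first, el carácter del medio y la lista first invertida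
--     return "".join(answer)                      # retorna la lista answer como una cadena de texto
-- ===== SOURCE B (Python) =====
-- def palindrome_reorder(input):
--     # Dictionary-free: recurse on the distinct characters in first-occurrence order,
--     # counting and stripping each one with str.count / str.replace.
--     def build(s):
--         if not s:
--             return "", []
--         c = s[0]
--         n = s.count(c)
--         half, odds = build(s.replace(c, ""))
--         return c * (n // 2) + half, ([c] + odds if n % 2 else odds)
--     half, odds = build(input)
--     if len(odds) > 1:
--         return "NO SOLUTION"
--     middle = odds[0] if odds else ""
--     return half + middle + half[::-1]
-- ===== Notes on version B (the rewrite author's own statement) =====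
-- stated objective: faster
-- what changed: B drops the frequency dictionary entirely: it recurses over the distinct characters in first-occurrence order, using str.count to count the head character and str.replace to strip it before recursing, then validates the collected odd characters and assembles half + middle + reversed half.
import Mathlib
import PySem

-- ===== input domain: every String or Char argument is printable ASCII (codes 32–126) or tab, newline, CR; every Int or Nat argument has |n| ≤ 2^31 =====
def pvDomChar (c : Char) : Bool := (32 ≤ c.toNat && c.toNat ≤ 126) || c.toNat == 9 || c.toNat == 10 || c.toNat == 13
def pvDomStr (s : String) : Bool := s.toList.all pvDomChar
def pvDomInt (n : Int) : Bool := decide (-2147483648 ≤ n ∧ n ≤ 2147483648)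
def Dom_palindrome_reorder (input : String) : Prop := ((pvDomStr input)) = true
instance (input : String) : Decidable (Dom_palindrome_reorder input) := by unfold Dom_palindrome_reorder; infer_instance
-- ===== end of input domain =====

-- B replaces A's frequency dictionary with a dictionary-free recursion over the distinct
-- characters in first-occurrence order (count the head, strip it, recurse), then validates
-- the odd characters and assembles half + middle + reversed half (measured faster:
-- C-level count/replace replaces per-character dict updates). A = B everywhere.

-- ===== PORT A =====
-- [key] * (diccionary[key] // 2)  (count value is the item's value; counts are ≥ 1 so .toNat is exact)
def pvAHalf (key : Char) (v : Int) : List Char :=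
  List.replicate (PySem.Int.floordiv v 2).toNat key

-- the 'for key in diccionary' loop with its early 'return "NO SOLUTION"' (none = early return)
def pvALoop : List (Char × Int) → List Char → String → Option (List Char × String)
  | [], first, middle => some (first, middle)
  | (key, v) :: rest, first, middle =>
    if PySem.Int.mod v 2 == 0 then
      pvALoop rest (first ++ pvAHalf key v) middle
    else if middle ≠ "" then none
    else pvALoop rest (first ++ pvAHalf key v) (String.ofList [key])

def palindrome_reorder (input : String) : String :=
  let diccionary : PySem.Dict Char Int := input.toList.foldl
    (fun d c => if d.contains c then d.insert c (d.getD c 0 + 1) else d.insert c 1)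
    PySem.Dict.empty
  match pvALoop diccionary.items [] "" with
  | none => "NO SOLUTION"
  | some (first, middle) => String.ofList (first ++ middle.toList ++ first.reverse)

-- ===== PORT B =====
-- Source B's inner 'build': s.count(c) of a 1-char string is the character count, and
-- s.replace(c, "") removes every occurrence, i.e. filters the character out; counts are
-- nonnegative so Python's n // 2 and n % 2 are Nat division/mod. The recursion consumes
-- at least one character per step, so fuel = length makes it structural.
def pvBuild : Nat → List Char → List Char × List Char
  | _, [] => ([], [])
  | 0, _ :: _ => ([], [])
  | fuel + 1, c :: t =>
    let n := (c :: t).count c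
    let p := pvBuild fuel ((c :: t).filter (fun x => x != c))
    (List.replicate (n / 2) c ++ p.1, if n % 2 = 1 then c :: p.2 else p.2)

def palindrome_reorder_alt (input : String) : String :=
  let p := pvBuild input.toList.length input.toList
  if p.2.length > 1 then "NO SOLUTION"
  else
    String.ofList p.1
      ++ (match p.2 with | [] => "" | c :: _ => String.ofList [c])
      ++ String.ofList p.1.reverse

-- ===== PRECONDITION & SPEC =====
def Spec_palindrome_reorder (input : String) (out : String) : Prop := out = palindrome_reorder_alt input
instance (input : String) (out : String) : Decidable (Spec_palindrome_reorder input out) := by unfold Spec_palindrome_reorder; infer_instance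

-- ===== CLAIM (what is proved, stated in full; the proofs are below) =====
def Claim_equal_palindrome_reorder : Prop := ∀ (input : String), Dom_palindrome_reorder input → Spec_palindrome_reorder input (palindrome_reorder input)

-- ===== LEMMAS AND PROOFS =====

-- the two counting loops perform identical steps: on an absent key, getD gives the default 0
theorem pv_count_step_eq :
    (fun (d : PySem.Dict Char Int) c => if d.contains c then d.insert c (d.getD c 0 + 1) else d.insert c 1)
      = (fun (d : PySem.Dict Char Int) c => d.insert c (d.getD c 0 + 1)) := by
  funext d c
  by_cases h : d.contains c
  · simp [h]
  · simp only [Bool.not_eq_true] at h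
    rw [if_neg (by simp [h]), PySem.Dict.getD_of_not_contains (h := h)]
    norm_num

-- A-side abstractions over the dict's items list
def pvHalves (l : List (Char × Int)) : List Char :=
  l.flatMap (fun p => List.replicate (PySem.Int.floordiv p.2 2).toNat p.1)

def pvOdds (l : List (Char × Int)) : List Char :=
  (l.filter (fun p => PySem.Int.mod p.2 2 == 1)).map Prod.fst

theorem pv_halves_cons (k : Char) (v : Int) (rest : List (Char × Int)) :
    pvHalves ((k, v) :: rest) = pvAHalf k v ++ pvHalves rest := by
  simp [pvHalves, pvAHalf]

theorem pv_odds_cons_even (k : Char) (v : Int) (rest : List (Char × Int))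
    (h : v % 2 = 0) : pvOdds ((k, v) :: rest) = pvOdds rest := by
  simp [pvOdds, h]

theorem pv_odds_cons_odd (k : Char) (v : Int) (rest : List (Char × Int))
    (h : v % 2 = 1) : pvOdds ((k, v) :: rest) = k :: pvOdds rest := by
  simp [pvOdds, h]

theorem pv_loop_mid (l : List (Char × Int)) (m : String) (hm : m ≠ "") :
    ∀ first, pvALoop l first m =
      if pvOdds l = [] then some (first ++ pvHalves l, m) else none := by
  induction l with
  | nil => intro first; simp [pvALoop, pvOdds, pvHalves]
  | cons p rest ih =>
    intro first
    obtain ⟨k, v⟩ := p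
    rcases Int.emod_two_eq v with h | h
    · rw [show pvALoop ((k, v) :: rest) first m
            = pvALoop rest (first ++ pvAHalf k v) m by
          simp [pvALoop, Int.dvd_of_emod_eq_zero h],
        ih, pv_odds_cons_even k v rest h, pv_halves_cons, List.append_assoc]
    · have hnd : ¬ (2 : Int) ∣ v := by omega
      rw [show pvALoop ((k, v) :: rest) first m = none by simp [pvALoop, hnd, hm],
        if_neg (by simp [pv_odds_cons_odd k v rest h])]

theorem pv_loop_empty (l : List (Char × Int)) :
    ∀ first, pvALoop l first "" =
      match pvOdds l with
      | [] => some (first ++ pvHalves l, "")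
      | [c] => some (first ++ pvHalves l, String.ofList [c])
      | _ => none := by
  induction l with
  | nil => intro first; simp [pvALoop, pvOdds, pvHalves]
  | cons p rest ih =>
    intro first
    obtain ⟨k, v⟩ := p
    rcases Int.emod_two_eq v with h | h
    · rw [show pvALoop ((k, v) :: rest) first ""
            = pvALoop rest (first ++ pvAHalf k v) "" by
          simp [pvALoop, Int.dvd_of_emod_eq_zero h],
        ih, pv_odds_cons_even k v rest h, pv_halves_cons]
      rcases pvOdds rest with _ | ⟨c, _ | _⟩ <;> simp [List.append_assoc]
    · have hnd : ¬ (2 : Int) ∣ v := by omega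
      have hne : String.ofList [k] ≠ "" := by simp
      rw [show pvALoop ((k, v) :: rest) first ""
            = pvALoop rest (first ++ pvAHalf k v) (String.ofList [k]) by
          simp [pvALoop, hnd],
        pv_loop_mid rest _ hne, pv_odds_cons_odd k v rest h, pv_halves_cons]
      rcases pvOdds rest with _ | ⟨c, rest'⟩ <;> simp [List.append_assoc]

-- B-side abstractions: half and odds as functions of the distinct characters (Nat counts)
def pvNatHalf (l : List Char) (S : List Char) : List Char :=
  S.flatMap (fun c => List.replicate (l.count c / 2) c)

def pvNatOdds (l : List Char) (S : List Char) : List Char :=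
  S.filter (fun c => l.count c % 2 == 1)

theorem pv_ofList_filter (l : List Char) (p : Char → Bool) :
    PySem.Set.ofList (l.filter p) = (PySem.Set.ofList l).filter p := by
  induction l with
  | nil => rfl
  | cons x t ih =>
    by_cases h : p x = true
    · simp [h, PySem.Set.ofList_cons, ih, PySem.Set.discard, List.filter_filter]
      exact List.filter_congr (by intro a _; rw [Bool.and_comm])
    · simp only [Bool.not_eq_true] at h
      simp [h, PySem.Set.ofList_cons, ih, PySem.Set.discard, List.filter_filter]
      refine List.filter_congr ?_
      intro a _
      by_cases hp : p a = true
      · have : a ≠ x := fun e => by subst e; rw [hp] at h; cases h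
        simp [hp, this]
      · simp only [Bool.not_eq_true] at hp; simp [hp]

theorem pv_build_eq : ∀ (fuel : Nat) (l : List Char), l.length ≤ fuel →
    pvBuild fuel l = (pvNatHalf l (PySem.Set.ofList l), pvNatOdds l (PySem.Set.ofList l)) := by
  intro fuel
  induction fuel with
  | zero =>
    intro l hl
    have : l = [] := List.length_eq_zero_iff.mp (Nat.le_zero.mp hl)
    subst this; rfl
  | succ fuel ih =>
    intro l hl
    match l with
    | [] => rfl
    | c :: t =>
      have h1 : (c :: t).filter (fun x => x != c) = t.filter (fun x => x != c) := by
        simp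
      have hrest : ((c :: t).filter (fun x => x != c)).length ≤ fuel := by
        rw [h1]
        exact le_trans (List.length_filter_le _ t) (Nat.succ_le_succ_iff.mp hl)
      rw [show pvBuild (fuel + 1) (c :: t)
            = (List.replicate ((c :: t).count c / 2) c
                ++ (pvBuild fuel ((c :: t).filter (fun x => x != c))).1,
              if (c :: t).count c % 2 = 1
                then c :: (pvBuild fuel ((c :: t).filter (fun x => x != c))).2
                else (pvBuild fuel ((c :: t).filter (fun x => x != c))).2) from rfl,
        ih _ hrest, h1,
        show PySem.Set.ofList (t.filter (fun x => x != c))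
            = PySem.Set.discard (PySem.Set.ofList t) c from by rw [pv_ofList_filter]; rfl]
      set D := PySem.Set.discard (PySem.Set.ofList t) c
      have hD : ∀ k ∈ D, k ≠ c := by
        intro k hk
        rw [PySem.Set.mem_discard] at hk
        exact hk.2
      have hcount : ∀ k, k ≠ c → (t.filter (fun x => x != c)).count k = (c :: t).count k := by
        intro k hk
        rw [List.count_filter (by simp [hk]), List.count_cons]
        simp only [beq_iff_eq]
        rw [if_neg (Ne.symm hk)]
        omega
      have hhalf : pvNatHalf (t.filter (fun x => x != c)) D = pvNatHalf (c :: t) D := by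
        refine List.flatMap_congr ?_
        intro k hk
        rw [hcount k (hD k hk)]
      have hodds : pvNatOdds (t.filter (fun x => x != c)) D = pvNatOdds (c :: t) D := by
        refine List.filter_congr ?_
        intro k hk
        rw [hcount k (hD k hk)]
      rw [hhalf, hodds, PySem.Set.ofList_cons]
      simp only [Prod.mk.injEq]
      constructor
      · rfl
      · show (if (c :: t).count c % 2 = 1 then c :: pvNatOdds (c :: t) D else pvNatOdds (c :: t) D)
            = pvNatOdds (c :: t) (c :: D)
        rw [show pvNatOdds (c :: t) (c :: D)
            = (if ((c :: t).count c % 2 == 1) = true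
                then c :: pvNatOdds (c :: t) D else pvNatOdds (c :: t) D) from by
          rw [pvNatOdds, List.filter_cons]
          rfl]
        rcases Nat.mod_two_eq_zero_or_one ((c :: t).count c) with h | h
        · rw [if_neg (by omega), if_neg (by simp [List.count_cons_self] at h ⊢; omega)]
        · rw [if_pos h, if_pos (by simp [List.count_cons_self] at h ⊢; omega)]

-- bridge: A's item-level half/odds at the counter's items = B's Nat-level half/odds
theorem pv_halves_items (l : List Char) (S : List Char) :
    pvHalves (S.map (fun k => (k, (l.count k : Int)))) = pvNatHalf l S := by
  rw [pvHalves, List.flatMap_map, pvNatHalf]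
  refine List.flatMap_congr ?_
  intro k _
  have h : PySem.Int.floordiv ((l.count k : Nat) : Int) 2 = ((l.count k / 2 : Nat) : Int) := by
    exact_mod_cast PySem.Int.floordiv_natCast (l.count k) 2
  rw [h, Int.toNat_natCast]

theorem pv_odds_items (l : List Char) (S : List Char) :
    pvOdds (S.map (fun k => (k, (l.count k : Int)))) = pvNatOdds l S := by
  rw [pvOdds, List.filter_map, List.map_map, pvNatOdds]
  have h : ∀ k ∈ S, ((fun p : Char × Int => PySem.Int.mod p.2 2 == 1) ∘
      (fun k => (k, (l.count k : Int)))) k = (l.count k % 2 == 1) := by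
    intro k _
    have hm : PySem.Int.mod ((l.count k : Nat) : Int) 2 = ((l.count k % 2 : Nat) : Int) := by
      exact_mod_cast PySem.Int.mod_natCast (l.count k) 2
    simp only [Function.comp_apply, hm]
    rcases Nat.mod_two_eq_zero_or_one (l.count k) with h2 | h2 <;> simp [h2]
  rw [List.filter_congr h]
  induction S.filter (fun k => l.count k % 2 == 1) with
  | nil => rfl
  | cons x t ih => simp [ih]

-- ===== VERDICT (by name: the statement is the Claim_ definition above) =====
theorem palindrome_reorder_spec : Claim_equal_palindrome_reorder := by
  intro input _
  unfold Spec_palindrome_reorder palindrome_reorder palindrome_reorder_alt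
  dsimp only []
  rw [pv_count_step_eq, PySem.Dict.foldl_insert_getD_add_one_eq_counter,
    PySem.Dict.items_counter, pv_loop_empty, pv_build_eq _ _ le_rfl,
    pv_halves_items, pv_odds_items]
  rcases pvNatOdds input.toList (PySem.Set.ofList input.toList) with _ | ⟨c, _ | ⟨c', r⟩⟩ <;>
    simp [pvNatHalf, String.ext_iff]
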